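-- pv_equiv track=rewrite | github.com/haha321-haha/font_manager | font_manager/adapters/base.py | normalize_font_name
-- ===== SOURCE A (Python) =====
-- def normalize_font_name(font_name: str) -> str:
--     """
--     标准化字体名称
--
--     Args:
--         font_name: 原始字体名称
--
--     Returns:
--         str: 标准化后的字体名称
--     """
--     if not font_name:
--         return ""
--
--     # 移除多余空格并转换为小写
--     normalized = ' '.join(font_name.split()).lower()
--
--     # 移除常见的样式后缀
--     suffixes = ['regular', 'bold', 'italic', 'light', 'medium', 'heavy']
--     for suffix in suffixes:
--         if normalized.endswith(f' {suffix}'):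
--             normalized = normalized[:-len(suffix)-1]
--             break
--
--     return normalized
-- ===== SOURCE B (Python) =====
-- _SUFFIXES = frozenset(('regular', 'bold', 'italic', 'light', 'medium', 'heavy'))
--
--
-- def normalize_font_name(font_name: str) -> str:
--     # Single character-level scan: build the whitespace-normalized lowercase
--     # output directly while remembering where its last word starts, then
--     # truncate once if that last word is a style suffix (and not the only word).
--     out = []
--     last_word_start = 0
--     word_count = 0
--     in_word = False
--     for ch in font_name.lower():
--         if ch.isspace():
--             in_word = False
--         else:
--             if not in_word:
--                 if out:
--                     out.append(' ')
--                 last_word_start = len(out)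
--                 word_count += 1
--                 in_word = True
--             out.append(ch)
--     if word_count > 1 and ''.join(out[last_word_start:]) in _SUFFIXES:
--         del out[last_word_start - 1:]
--     return ''.join(out)
-- ===== Notes on version B (the rewrite author's own statement) =====
-- stated objective: alternative
-- what changed: B replaces A's split/join/lower staging and six endswith probes with one character-level scan that emits the normalized lowercase string directly while tracking where its final word starts, then truncates once if that word is a style suffix.
import Mathlib
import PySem

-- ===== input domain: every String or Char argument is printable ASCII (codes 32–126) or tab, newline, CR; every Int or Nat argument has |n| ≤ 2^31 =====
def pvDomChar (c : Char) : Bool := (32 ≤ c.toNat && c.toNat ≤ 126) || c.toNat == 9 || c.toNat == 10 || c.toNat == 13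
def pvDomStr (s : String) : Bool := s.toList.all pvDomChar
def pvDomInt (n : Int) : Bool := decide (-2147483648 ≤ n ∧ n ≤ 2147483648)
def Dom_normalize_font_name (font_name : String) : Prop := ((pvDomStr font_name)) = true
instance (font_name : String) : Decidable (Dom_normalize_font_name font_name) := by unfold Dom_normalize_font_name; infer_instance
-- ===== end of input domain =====

-- B replaces A's split/join staging and endswith probes by one character-level scan that emits the
-- normalized lowercase string directly while tracking where its final word starts, then truncates once. Objective: alternative.

-- ===== PORT A =====
-- A's 'for suffix in suffixes: if normalized.endswith(…): …; break' loop, one constructor per iteration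
def pvStripLoop : List String → String → String
  | [], normalized => normalized
  | suffix :: rest, normalized =>
      if PySem.Str.endswith normalized (" " ++ suffix) then
        PySem.Str.slice normalized none (some (-(PySem.Str.len suffix) - 1))
      else pvStripLoop rest normalized

def normalize_font_name (font_name : String) : String :=
  if font_name = "" then ""
  else
    let normalized := PySem.Str.lower (PySem.Str.join " " (PySem.Str.split₀ font_name))
    pvStripLoop ["regular", "bold", "italic", "light", "medium", "heavy"] normalized

-- ===== PORT B =====
def pvSuffixSet : PySem.Set String :=
  PySem.Set.ofList ["regular", "bold", "italic", "light", "medium", "heavy"]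

-- B's 'for ch in font_name.lower(): …' scan; state = (out, last_word_start, word_count, in_word)
def pvScan : List Char → List Char → Nat → Nat → Bool → List Char × Nat × Nat
  | [], out, ls, wc, _ => (out, ls, wc)
  | c :: rest, out, ls, wc, inw =>
      if PySem.Chars.isspace c then
        pvScan rest out ls wc false
      else if inw then
        pvScan rest (out ++ [c]) ls wc true
      else
        let out' := if out.isEmpty then out else out ++ [' ']
        pvScan rest (out' ++ [c]) out'.length (wc + 1) true

def normalize_font_name_alt (font_name : String) : String :=
  let res := pvScan (PySem.Str.lower font_name).toList [] 0 0 false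
  if decide (1 < res.2.2) && PySem.Set.contains pvSuffixSet (String.ofList (res.1.drop res.2.1)) then
    String.ofList (res.1.take (res.2.1 - 1))
  else
    String.ofList res.1

-- ===== PRECONDITION & SPEC =====
def Spec_normalize_font_name (font_name : String) (out : String) : Prop := out = normalize_font_name_alt font_name
instance (font_name : String) (out : String) : Decidable (Spec_normalize_font_name font_name out) := by unfold Spec_normalize_font_name; infer_instance

-- ===== CLAIM (what is proved, stated in full; the proofs are below) =====
def Claim_equal_normalize_font_name : Prop := ∀ (font_name : String), Dom_normalize_font_name font_name → Spec_normalize_font_name font_name (normalize_font_name font_name)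

-- ===== LEMMAS AND PROOFS =====

-- a word as produced by str.split(): nonempty and free of whitespace
def pvNice (w : List Char) : Prop := w ≠ [] ∧ ∀ c ∈ w, PySem.Chars.isspace c = false

theorem pv_isspace_high (d : Char) (h1 : 65 ≤ d.toNat) (h2 : d.toNat ≤ 122) :
    PySem.Chars.isspace d = false := by
  unfold PySem.Chars.isspace
  simp only [Bool.or_eq_false_iff, Bool.and_eq_false_iff, decide_eq_false_iff_not]
  omega

theorem pv_isspace_lowerChar (c : Char) :
    PySem.Chars.isspace (PySem.Chars.lowerChar c) = PySem.Chars.isspace c := by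
  unfold PySem.Chars.lowerChar
  split_ifs with h
  · have hb : 65 ≤ c.toNat ∧ c.toNat ≤ 90 := by
      unfold PySem.Chars.isupper at h
      simp only [Bool.and_eq_true, decide_eq_true_eq] at h
      exact ⟨h.1, h.2⟩
    have hv : (c.toNat + 32).isValidChar := by left; omega
    have ht : (Char.ofNat (c.toNat + 32)).toNat = c.toNat + 32 := by
      rw [Char.toNat_ofNat, if_pos hv]
    rw [pv_isspace_high _ (by omega) (by omega), pv_isspace_high c (by omega) (by omega)]
  · rfl

theorem pv_go_eq_nil (cur : List Char) (acc : List (List Char)) :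
    PySem.Chars.split₀.go [] cur acc
      = if cur.isEmpty then acc.reverse else (cur.reverse :: acc).reverse := rfl

theorem pv_go_eq_cons (c : Char) (rest cur : List Char) (acc : List (List Char)) :
    PySem.Chars.split₀.go (c :: rest) cur acc
      = if PySem.Chars.isspace c then
          (if cur.isEmpty then PySem.Chars.split₀.go rest [] acc
           else PySem.Chars.split₀.go rest [] (cur.reverse :: acc))
        else PySem.Chars.split₀.go rest (c :: cur) acc := rfl

theorem pv_go_nice (s : List Char) : ∀ (cur : List Char) (acc : List (List Char)),
    (∀ c ∈ cur, PySem.Chars.isspace c = false) →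
    (∀ w ∈ acc, pvNice w) →
    ∀ w ∈ PySem.Chars.split₀.go s cur acc, pvNice w := by
  induction s with
  | nil =>
    intro cur acc hcur hacc w hw
    rw [pv_go_eq_nil] at hw
    by_cases hc : cur.isEmpty
    · rw [if_pos hc] at hw
      exact hacc w (List.mem_reverse.mp hw)
    · rw [if_neg hc] at hw
      rcases List.mem_cons.mp (List.mem_reverse.mp hw) with h | h
      · subst h
        refine ⟨by simpa [List.isEmpty_iff] using hc, fun c hc' => hcur c (List.mem_reverse.mp hc')⟩
      · exact hacc w h
  | cons c rest ih =>
    intro cur acc hcur hacc w hw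
    rw [pv_go_eq_cons] at hw
    by_cases hsp : PySem.Chars.isspace c
    · rw [if_pos hsp] at hw
      by_cases hc : cur.isEmpty
      · rw [if_pos hc] at hw
        exact ih [] acc (by simp) hacc w hw
      · rw [if_neg hc] at hw
        refine ih [] (cur.reverse :: acc) (by simp) ?_ w hw
        intro v hv
        rcases List.mem_cons.mp hv with h | h
        · subst h
          exact ⟨by simpa [List.isEmpty_iff] using hc, fun d hd => hcur d (List.mem_reverse.mp hd)⟩
        · exact hacc v h
    · rw [if_neg hsp] at hw
      refine ih (c :: cur) acc ?_ hacc w hw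
      intro d hd
      rcases List.mem_cons.mp hd with h | hd
      · subst h; simpa using hsp
      · exact hcur d hd

theorem pv_split_nice (s : List Char) : ∀ w ∈ PySem.Chars.split₀ s, pvNice w :=
  pv_go_nice s [] [] (by simp) (by simp)

theorem pv_go_lower (s : List Char) :
    ∀ (cur : List Char) (acc : List (List Char)),
    PySem.Chars.split₀.go (s.map PySem.Chars.lowerChar) (cur.map PySem.Chars.lowerChar)
      (acc.map (List.map PySem.Chars.lowerChar))
    = (PySem.Chars.split₀.go s cur acc).map (List.map PySem.Chars.lowerChar) := by
  induction s with
  | nil =>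
    intro cur acc
    simp only [List.map_nil, pv_go_eq_nil, List.isEmpty_map]
    by_cases hc : cur.isEmpty
    · simp [hc]
    · simp [hc, List.map_reverse]
  | cons c rest ih =>
    intro cur acc
    simp only [List.map_cons, pv_go_eq_cons, pv_isspace_lowerChar, List.isEmpty_map]
    by_cases hsp : PySem.Chars.isspace c
    · simp only [if_pos hsp]
      by_cases hc : cur.isEmpty
      · simpa [hc] using ih [] acc
      · simp only [if_neg hc]
        have := ih [] (cur.reverse :: acc)
        simpa [List.map_reverse] using this
    · simp only [if_neg hsp]
      exact ih (c :: cur) acc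

theorem pv_split_lower (s : List Char) :
    PySem.Chars.split₀ (PySem.Chars.lower s) = (PySem.Chars.split₀ s).map PySem.Chars.lower := by
  have := pv_go_lower s [] []
  simpa [PySem.Chars.split₀, PySem.Chars.lower] using this

theorem pv_lower_join (ps : List (List Char)) :
    PySem.Chars.lower (PySem.Chars.join [' '] ps)
      = PySem.Chars.join [' '] (ps.map PySem.Chars.lower) := by
  induction ps with
  | nil => simp [PySem.Chars.join_nil, PySem.Chars.lower]
  | cons p rest ih =>
    cases rest with
    | nil => simp [PySem.Chars.join_singleton, PySem.Chars.lower]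
    | cons q t =>
      simp only [List.map_cons, PySem.Chars.join_cons_cons]
      simp only [List.map_cons] at ih
      simp only [PySem.Chars.lower, List.map_append] at ih ⊢
      rw [ih]
      congr 1

theorem pv_join_snoc (init : List (List Char)) (l : List Char) (h : init ≠ []) :
    PySem.Chars.join [' '] (init ++ [l]) = PySem.Chars.join [' '] init ++ ' ' :: l := by
  induction init with
  | nil => exact absurd rfl h
  | cons p rest ih =>
    cases rest with
    | nil => simp [PySem.Chars.join_singleton, PySem.Chars.join_cons_cons]
    | cons q t =>
      have hne : q :: t ≠ [] := by simp
      simp only [List.cons_append, PySem.Chars.join_cons_cons]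
      rw [show q :: (t ++ [l]) = (q :: t) ++ [l] from rfl, ih hne]; simp

theorem pv_join_snoc_char (A : List (List Char)) (w : List Char) (c : Char) :
    PySem.Chars.join [' '] (A ++ [w ++ [c]]) = PySem.Chars.join [' '] (A ++ [w]) ++ [c] := by
  cases A with
  | nil => simp [PySem.Chars.join_singleton]
  | cons p t =>
    rw [pv_join_snoc _ _ (by simp), pv_join_snoc _ _ (by simp)]
    simp

theorem pv_join_ne_nil (A : List (List Char)) (hA : A ≠ []) (h : ∀ w ∈ A, w ≠ []) :
    PySem.Chars.join [' '] A ≠ [] := by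
  cases A with
  | nil => exact absurd rfl hA
  | cons x t =>
    cases t with
    | nil =>
      rw [PySem.Chars.join_singleton]
      exact h x (by simp)
    | cons y t' =>
      rw [PySem.Chars.join_cons_cons]
      have := h x (by simp)
      cases hx : x with
      | nil => exact absurd hx this
      | cons a b => simp

theorem pv_endswith_iff (ws : List (List Char)) (hw : ∀ w ∈ ws, pvNice w)
    (suf : List Char) (hsuf : pvNice suf) :
    ((' ' :: suf) <:+ PySem.Chars.join [' '] ws) ↔ ∃ init, ws = init ++ [suf] ∧ init ≠ [] := by
  have hsp : PySem.Chars.isspace ' ' = true := by decide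
  induction ws using List.reverseRecOn with
  | nil =>
    simp only [PySem.Chars.join_nil]
    constructor
    · intro h
      have := List.IsSuffix.length_le h
      simp at this
    · rintro ⟨init, hinit, -⟩
      exact absurd hinit (by simp)
  | append_singleton init l _ =>
    have hl : pvNice l := hw l (by simp)
    have hspl : ' ' ∉ l := fun hm => by have := hl.2 ' ' hm; rw [hsp] at this; exact absurd this (by simp)
    have hsps : ' ' ∉ suf := fun hm => by have := hsuf.2 ' ' hm; rw [hsp] at this; exact absurd this (by simp)
    constructor
    · intro h
      by_cases hi : init = []
      · subst hi
        simp only [List.nil_append, PySem.Chars.join_singleton] at h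
        exact absurd (h.mem (by simp)) hspl
      · rw [pv_join_snoc init l hi] at h
        have h2 : (' ' :: l) <:+ PySem.Chars.join [' '] init ++ ' ' :: l := List.suffix_append _ _
        rcases List.suffix_or_suffix_of_suffix h h2 with h3 | h3
        · rcases List.suffix_cons_iff.mp h3 with h4 | h4
          · have : suf = l := by injection h4
            exact ⟨init, by rw [this], hi⟩
          · exact absurd (h4.mem (by simp)) hspl
        · rcases List.suffix_cons_iff.mp h3 with h4 | h4
          · have : l = suf := by injection h4
            exact ⟨init, by rw [this], hi⟩
          · exact absurd (h4.mem (by simp)) hsps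
    · rintro ⟨init', hinit, hne⟩
      have hls : l = suf := by
        have := congrArg (List.getLast? ·) hinit
        simpa using this
      subst hls
      have hii : init = init' := by
        have := congrArg List.dropLast hinit
        simpa using this
      rw [hii, pv_join_snoc init' l hne]
      exact List.suffix_append _ _

theorem pv_loop (sufs : List String) (hs : ∀ u ∈ sufs, pvNice u.toList)
    (ws : List (List Char)) (hw : ∀ w ∈ ws, pvNice w)
    (n : String) (hn : n.toList = PySem.Chars.join [' '] ws) :
    (pvStripLoop sufs n).toList =
      if 1 < ws.length ∧ ∃ u ∈ sufs, ws.getLast? = some u.toList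
      then PySem.Chars.join [' '] ws.dropLast
      else PySem.Chars.join [' '] ws := by
  induction sufs with
  | nil =>
    rw [if_neg (by simp)]
    simpa using hn
  | cons suffix rest ih =>
    have hsufnice : pvNice suffix.toList := hs suffix (by simp)
    have hend : PySem.Str.endswith n (" " ++ suffix)
        = PySem.Chars.endswith n.toList (' ' :: suffix.toList) := by
      rw [PySem.Str.endswith_eq]
      congr 1
      rw [String.toList_append]
      rfl
    show (if PySem.Str.endswith n (" " ++ suffix) then _ else pvStripLoop rest n).toList = _
    by_cases hE : (' ' :: suffix.toList) <:+ PySem.Chars.join [' '] ws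
    · obtain ⟨init, hws, hne⟩ := (pv_endswith_iff ws hw suffix.toList hsufnice).mp hE
      subst hws
      have hendT : PySem.Str.endswith n (" " ++ suffix) = true := by
        rw [hend, hn]
        exact (PySem.Chars.endswith_iff _ _).mpr hE
      rw [if_pos hendT]
      have hk : (0:Nat) < suffix.toList.length + 1 := by omega
      have hidx : -(PySem.Str.len suffix) - 1 = -((suffix.toList.length + 1 : Nat) : Int) := by
        rw [PySem.Str.len_eq]; push_cast; ring
      rw [PySem.Str.toList_slice, PySem.Chars.slice_eq_listSlice, hidx,
        PySem.List.slice_to_neg_natCast _ _ hk, hn, pv_join_snoc init suffix.toList hne]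
      have hlen : (PySem.Chars.join [' '] init ++ ' ' :: suffix.toList).length
          - (suffix.toList.length + 1) = (PySem.Chars.join [' '] init).length := by
        rw [List.length_append, List.length_cons]
        omega
      rw [hlen, List.take_left]
      have hcond : 1 < (init ++ [suffix.toList]).length ∧
          ∃ u ∈ suffix :: rest, (init ++ [suffix.toList]).getLast? = some u.toList := by
        refine ⟨?_, suffix, by simp, by simp⟩
        rw [List.length_append]
        have := List.length_pos_iff.mpr hne
        simp
        omega
      rw [if_pos hcond, List.dropLast_concat]
    · have hendF : PySem.Str.endswith n (" " ++ suffix) = false := by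
        rw [hend, hn]
        simp only [Bool.eq_false_iff]
        intro hc
        exact hE ((PySem.Chars.endswith_iff _ _).mp hc)
      rw [hendF]
      simp only [Bool.false_eq_true, if_false]
      rw [ih (fun u hu => hs u (by simp [hu]))]
      by_cases hc2 : 1 < ws.length ∧ ∃ u ∈ rest, ws.getLast? = some u.toList
      · rw [if_pos hc2, if_pos ⟨hc2.1, hc2.2.choose, by simp [hc2.2.choose_spec.1], hc2.2.choose_spec.2⟩]
      · rw [if_neg hc2, if_neg ?_]
        rintro ⟨hlen2, u, hu, hlast⟩
        rcases List.mem_cons.mp hu with h | h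
        · subst h
          apply hE
          refine (pv_endswith_iff ws hw u.toList hsufnice).mpr
            ⟨ws.dropLast, (List.dropLast_append_getLast? _ hlast).symm, ?_⟩
          intro hdl
          have := congrArg List.length hdl
          simp at this
          omega
        · exact hc2 ⟨hlen2, u, h, hlast⟩

-- the scan invariant: pvScan mirrors split₀.go — out is the join of the words so far,
-- wc counts them, and ls points at the start of the last word inside out
theorem pv_scan_go (s : List Char) : ∀ (cur : List Char) (acc : List (List Char))
    (out : List Char) (ls wc : Nat),
    (∀ w ∈ acc, w ≠ []) →
    out = PySem.Chars.join [' '] ((if cur = [] then acc else cur.reverse :: acc).reverse) →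
    wc = (if cur = [] then acc else cur.reverse :: acc).length →
    (∀ w, (if cur = [] then acc else cur.reverse :: acc).head? = some w → ls + w.length = out.length) →
    (pvScan s out ls wc (!cur.isEmpty)).1
        = PySem.Chars.join [' '] (PySem.Chars.split₀.go s cur acc)
    ∧ (pvScan s out ls wc (!cur.isEmpty)).2.2 = (PySem.Chars.split₀.go s cur acc).length
    ∧ (∀ w, (PySem.Chars.split₀.go s cur acc).getLast? = some w →
        (pvScan s out ls wc (!cur.isEmpty)).2.1 + w.length
          = (PySem.Chars.join [' '] (PySem.Chars.split₀.go s cur acc)).length) := by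
  induction s with
  | nil =>
    intro cur acc out ls wc hacc hout hwc hls
    rw [pv_go_eq_nil]
    have hS : (if cur.isEmpty then acc.reverse else (cur.reverse :: acc).reverse)
        = (if cur = [] then acc else cur.reverse :: acc).reverse := by
      by_cases hc : cur = [] <;> simp [hc]
    rw [hS]
    refine ⟨hout, ?_, ?_⟩
    · show wc = _
      rw [List.length_reverse]; exact hwc
    · intro w hw
      rw [List.getLast?_reverse] at hw
      show ls + w.length = _
      rw [← hout]; exact hls w hw
  | cons c rest ih =>
    intro cur acc out ls wc hacc hout hwc hls
    rw [pv_go_eq_cons]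
    by_cases hsp : PySem.Chars.isspace c
    · rw [if_pos hsp]
      have hstep : pvScan (c :: rest) out ls wc (!cur.isEmpty)
          = pvScan rest out ls wc false := by
        simp [pvScan, hsp]
      by_cases hc : cur = []
      · subst hc
        rw [if_pos (by simp), hstep]
        have := ih [] acc out ls wc hacc hout hwc hls
        simpa using this
      · rw [if_neg (by simp [hc]), hstep]
        have hacc' : ∀ w ∈ cur.reverse :: acc, w ≠ [] := by
          intro w hw
          rcases List.mem_cons.mp hw with h | h
          · subst h; simpa using hc
          · exact hacc w h
        have := ih [] (cur.reverse :: acc) out ls wc hacc'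
          (by simpa [hc] using hout)
          (by simpa [hc] using hwc)
          (by
            intro w hw
            refine hls w ?_
            simp only [if_neg hc]
            simpa using hw)
        simpa using this
    · rw [if_neg hsp]
      by_cases hc : cur = []
      · subst hc
        have hout0 : out = PySem.Chars.join [' '] acc.reverse := by simpa using hout
        have hwc0 : wc = acc.length := by simpa using hwc
        by_cases ha : acc = []
        · subst ha
          have hoe : out = [] := by simpa [PySem.Chars.join_nil] using hout0
          subst hoe
          have hwc1 : wc = 0 := by simpa using hwc0
          subst hwc1
          have hstep : pvScan (c :: rest) [] ls 0 (!([] : List Char).isEmpty)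
              = pvScan rest [c] 0 1 true := by
            simp [pvScan, hsp]
          rw [hstep]
          have := ih [c] [] [c] 0 1 (by simp)
            (by simp [PySem.Chars.join_singleton])
            (by simp)
            (by intro w hw; simp at hw; subst hw; simp)
          simpa using this
        · have hone : out ≠ [] := by
            rw [hout0]
            refine pv_join_ne_nil _ (by simpa using ha) ?_
            intro w hw
            exact hacc w (List.mem_reverse.mp hw)
          have hoe : out.isEmpty = false := by simpa [List.isEmpty_iff] using hone
          have hstep : pvScan (c :: rest) out ls wc (!([] : List Char).isEmpty)
              = pvScan rest ((out ++ [' ']) ++ [c]) (out ++ [' ']).length (wc + 1) true := by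
            simp [pvScan, hsp, hoe]
          rw [hstep]
          have hkey : (out ++ [' ']) ++ [c]
              = PySem.Chars.join [' '] (acc.reverse ++ [[c]]) := by
            rw [pv_join_snoc _ _ (by simpa using ha), ← hout0]
            simp
          have := ih [c] acc ((out ++ [' ']) ++ [c]) (out ++ [' ']).length (wc + 1) hacc
            (by simpa using hkey)
            (by simp [hwc0])
            (by intro w hw; simp at hw; subst hw; simp)
          simpa using this
      · have hce : cur.isEmpty = false := by simpa [List.isEmpty_iff] using hc
        have hstep : pvScan (c :: rest) out ls wc (!cur.isEmpty)
            = pvScan rest (out ++ [c]) ls wc true := by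
          simp [pvScan, hsp, hce]
        rw [hstep]
        have hout1 : out = PySem.Chars.join [' '] (acc.reverse ++ [cur.reverse]) := by
          simpa [hc] using hout
        have hout2 : out ++ [c]
            = PySem.Chars.join [' '] (acc.reverse ++ [cur.reverse ++ [c]]) := by
          rw [pv_join_snoc_char, ← hout1]
        have := ih (c :: cur) acc (out ++ [c]) ls wc hacc
          (by simpa using hout2)
          (by simpa [hc] using hwc)
          (by
            intro w hw
            have hw2 : (c :: cur).reverse = w := by
              have h := hw
              simp only [if_neg (show ¬((c :: cur) = []) by simp), List.head?_cons,
                Option.some.injEq] at h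
              exact h
            have hlsv2 : ls + cur.length = out.length := by
              have h := hls cur.reverse (by simp [hc])
              simpa using h
            subst hw2
            simp only [List.length_append, List.length_reverse, List.length_cons,
              List.length_nil]
            omega)
        simpa using this

-- ===== VERDICT (by name: the statement is the Claim_ definition above) =====
set_option maxRecDepth 8192 in
theorem normalize_font_name_spec : Claim_equal_normalize_font_name := by
  intro font_name _
  show normalize_font_name font_name = normalize_font_name_alt font_name
  by_cases hfe : font_name = ""
  · subst hfe; decide
  · set ws := (PySem.Chars.split₀ font_name.toList).map PySem.Chars.lower with hws
    have hwnice : ∀ w ∈ ws, pvNice w := by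
      intro w hwm
      obtain ⟨w0, hw0, rfl⟩ := List.mem_map.mp hwm
      obtain ⟨h1, h2⟩ := pv_split_nice _ w0 hw0
      refine ⟨by simp [PySem.Chars.lower, h1], ?_⟩
      intro c hc
      obtain ⟨d, hd, rfl⟩ := List.mem_map.mp (by simpa [PySem.Chars.lower] using hc)
      rw [pv_isspace_lowerChar]; exact h2 d hd
    have hsufs : ∀ u ∈ (["regular", "bold", "italic", "light", "medium", "heavy"] : List String),
        pvNice u.toList := by
      intro u hu
      unfold pvNice
      fin_cases hu <;> exact ⟨by decide, by simp [PySem.Chars.isspace]⟩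
    -- A side
    have hA : (normalize_font_name font_name).toList =
        if 1 < ws.length ∧ ∃ u ∈ (["regular", "bold", "italic", "light", "medium", "heavy"] : List String),
            ws.getLast? = some u.toList
        then PySem.Chars.join [' '] ws.dropLast
        else PySem.Chars.join [' '] ws := by
      unfold normalize_font_name
      rw [if_neg hfe]
      refine pv_loop _ hsufs ws hwnice _ ?_
      rw [PySem.Str.toList_lower, PySem.Str.toList_join, PySem.Str.split₀_map_toList]
      rw [show (" " : String).toList = [' '] from rfl, pv_lower_join]
    -- B side: run the scan invariant from the initial state
    have hgo : PySem.Chars.split₀.go (PySem.Chars.lower font_name.toList) [] [] = ws := by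
      rw [show PySem.Chars.split₀.go (PySem.Chars.lower font_name.toList) [] []
            = PySem.Chars.split₀ (PySem.Chars.lower font_name.toList) from rfl,
          pv_split_lower]
    have hscan := pv_scan_go (PySem.Chars.lower font_name.toList) [] [] [] 0 0
      (by simp) (by simp [PySem.Chars.join_nil]) (by simp) (by simp)
    rw [hgo] at hscan
    have hresdef : pvScan (PySem.Str.lower font_name).toList [] 0 0 false
        = pvScan (PySem.Chars.lower font_name.toList) [] 0 0 (!([] : List Char).isEmpty) := by
      rw [PySem.Str.toList_lower]
      rfl
    rw [← hresdef] at hscan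
    obtain ⟨h1, h2, h3⟩ := hscan
    have hBdef : normalize_font_name_alt font_name =
        if decide (1 < (pvScan (PySem.Str.lower font_name).toList [] 0 0 false).2.2)
            && PySem.Set.contains pvSuffixSet (String.ofList
              ((pvScan (PySem.Str.lower font_name).toList [] 0 0 false).1.drop
                (pvScan (PySem.Str.lower font_name).toList [] 0 0 false).2.1)) then
          String.ofList ((pvScan (PySem.Str.lower font_name).toList [] 0 0 false).1.take
            ((pvScan (PySem.Str.lower font_name).toList [] 0 0 false).2.1 - 1))
        else String.ofList (pvScan (PySem.Str.lower font_name).toList [] 0 0 false).1 := rfl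
    obtain ⟨res, hres⟩ : ∃ r, pvScan (PySem.Str.lower font_name).toList [] 0 0 false = r :=
      ⟨_, rfl⟩
    rw [hres] at h1 h2 h3 hBdef
    by_cases hcc : (1 < ws.length ∧ ∃ u ∈ (["regular", "bold", "italic", "light", "medium", "heavy"] : List String),
        ws.getLast? = some u.toList)
    · obtain ⟨hlen1, u, hu, hlast⟩ := hcc
      have hwseq : ws = ws.dropLast ++ [u.toList] := (List.dropLast_append_getLast? _ hlast).symm
      have hinitne : ws.dropLast ≠ [] := by
        intro h
        have := congrArg List.length hwseq
        simp [h] at this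
        omega
      have hjoin : PySem.Chars.join [' '] ws
          = PySem.Chars.join [' '] ws.dropLast ++ ' ' :: u.toList := by
        conv_lhs => rw [hwseq]
        rw [pv_join_snoc _ _ hinitne]
      have hlsv : res.2.1 = (PySem.Chars.join [' '] ws.dropLast).length + 1 := by
        have h3' := h3 u.toList hlast
        rw [hjoin] at h3'
        simp only [List.length_append, List.length_cons] at h3'
        omega
      have hsplit : PySem.Chars.join [' '] ws
          = (PySem.Chars.join [' '] ws.dropLast ++ [' ']) ++ u.toList := by
        rw [hjoin]; simp
      have hdrop : res.1.drop res.2.1 = u.toList := by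
        rw [h1, hsplit, hlsv,
          show (PySem.Chars.join [' '] ws.dropLast).length + 1
            = (PySem.Chars.join [' '] ws.dropLast ++ [' ']).length by simp]
        exact List.drop_left
      have htake : res.1.take (res.2.1 - 1) = PySem.Chars.join [' '] ws.dropLast := by
        rw [h1, hsplit, hlsv, Nat.add_sub_cancel,
          show (PySem.Chars.join [' '] ws.dropLast).length
            = (PySem.Chars.join [' '] ws.dropLast).length from rfl]
        rw [List.append_assoc]
        exact List.take_left
      have hcond : (decide (1 < res.2.2) && PySem.Set.contains pvSuffixSet
          (String.ofList (res.1.drop res.2.1))) = true := by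
        rw [hdrop, h2]
        simp only [Bool.and_eq_true, decide_eq_true_eq]
        refine ⟨hlen1, ?_⟩
        refine (PySem.Set.contains_iff _ _).mpr ?_
        refine (PySem.Set.mem_ofList _ _).mpr ?_
        simpa using hu
      apply String.toList_inj.mp
      rw [hA, if_pos ⟨hlen1, u, hu, hlast⟩, hBdef, hcond, if_pos rfl, String.toList_ofList,
        htake]
    · have hcond : (decide (1 < res.2.2) && PySem.Set.contains pvSuffixSet
          (String.ofList (res.1.drop res.2.1))) = false := by
        by_cases hl1 : 1 < ws.length
        · cases hws' : ws.getLast? with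
          | none =>
            exfalso
            have := List.getLast?_eq_none_iff.mp hws'
            simp [this] at hl1
          | some last =>
            have hwseq : ws = ws.dropLast ++ [last] := (List.dropLast_append_getLast? _ hws').symm
            have hinitne : ws.dropLast ≠ [] := by
              intro h
              have := congrArg List.length hwseq
              simp [h] at this
              omega
            have hjoin : PySem.Chars.join [' '] ws
                = PySem.Chars.join [' '] ws.dropLast ++ ' ' :: last := by
              conv_lhs => rw [hwseq]
              rw [pv_join_snoc _ _ hinitne]
            have hlsv : res.2.1 = (PySem.Chars.join [' '] ws.dropLast).length + 1 := by
              have h3' := h3 last hws'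
              rw [hjoin] at h3'
              simp only [List.length_append, List.length_cons] at h3'
              omega
            have hdrop : res.1.drop res.2.1 = last := by
              rw [h1, show PySem.Chars.join [' '] ws
                    = (PySem.Chars.join [' '] ws.dropLast ++ [' ']) ++ last by rw [hjoin]; simp,
                hlsv,
                show (PySem.Chars.join [' '] ws.dropLast).length + 1
                  = (PySem.Chars.join [' '] ws.dropLast ++ [' ']).length by simp]
              simp
            rw [hdrop]
            simp only [Bool.and_eq_false_iff]
            right
            rw [Bool.eq_false_iff]
            intro hcont
            have hmem := (PySem.Set.mem_ofList _ _).mp ((PySem.Set.contains_iff _ _).mp hcont)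
            exact hcc ⟨hl1, String.ofList last, hmem, by rw [hws']; simp⟩
        · rw [h2]
          simp [hl1]
      apply String.toList_inj.mp
      rw [hA, if_neg hcc, hBdef, hcond, if_neg (by simp), String.toList_ofList]
      exact h1.symm
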